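-- pv_equiv track=rewrite | github.com/suprodigy/Algorithm | BOJ_python/1316.py | is_group_word
-- ===== SOURCE A (Python) =====
-- def is_group_word(string):
--     checked = [False] * 26
--     idx = 0
--     while idx < len(string):
--         if checked[ord(string[idx]) - ord('a')]:
--             return False
--         checked[ord(string[idx]) - ord('a')] = True
--         idx += 1
--         while idx < len(string) and string[idx - 1] == string[idx]:
--             idx += 1
--     return True
-- ===== SOURCE B (Python) =====
-- def is_group_word(string):
--     # Phase 1: collapse the string to one representative per contiguous block.
--     blocks = []
--     for c in string:
--         if not blocks or blocks[-1] != c: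
--             blocks.append(c)
--     # Phase 2: each representative's letter slot may be marked only once.
--     checked = [False] * 26
--     for c in blocks:
--         i = ord(c) - ord('a')
--         if checked[i]:
--             return False
--         checked[i] = True
--     return True
-- ===== Notes on version B (the rewrite author's own statement) =====
-- stated objective: alternative
-- what changed: A's single interleaved while-loop that marks a letter and then skips its run with an inner duplicate-skipping loop is split into two independent phases: first collapse the string to one representative per contiguous block, then a plain marking pass over the collapsed sequence with the 26-slot array.
-- outside the precondition, e.g. on is_group_word('aba!'): A returns False, B returns False
import Mathlib
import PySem

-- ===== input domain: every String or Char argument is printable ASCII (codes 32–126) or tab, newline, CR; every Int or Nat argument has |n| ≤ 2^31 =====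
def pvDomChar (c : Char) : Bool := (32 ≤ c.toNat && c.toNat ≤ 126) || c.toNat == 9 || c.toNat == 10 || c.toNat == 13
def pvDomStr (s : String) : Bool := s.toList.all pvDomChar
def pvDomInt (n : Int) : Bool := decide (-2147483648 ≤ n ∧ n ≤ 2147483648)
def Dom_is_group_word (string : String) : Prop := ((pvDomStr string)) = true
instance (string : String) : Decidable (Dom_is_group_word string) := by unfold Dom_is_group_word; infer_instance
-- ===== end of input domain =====

-- B splits A's interleaved mark-and-skip while-loop into two phases (collapse runs, then mark); no speed claim.


-- ===== PORT A =====
-- inner 'while idx < len(string) and string[idx-1] == string[idx]: idx += 1';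
-- it is entered only with idx ≥ 1, where s[idx-1]? is exactly string[idx-1]
def agwSkip (s : List Char) (idx : Nat) : Nat :=
  if idx < s.length then
    if s[idx-1]? = s[idx]? then agwSkip s (idx + 1) else idx
  else idx
termination_by s.length - idx

theorem agwSkip_ge (s : List Char) (idx : Nat) : idx ≤ agwSkip s idx := by
  unfold agwSkip
  split
  · split
    · have := agwSkip_ge s (idx + 1); omega
    · exact le_refl _
  · exact le_refl _
termination_by s.length - idx

-- outer while-loop of A; checked[ord(c)-97] read/write via pyGetD/pySetD (exact where Python does not raise)
def agwLoop (s : List Char) (checked : List Bool) (idx : Nat) : Bool :=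
  if h : idx < s.length then
    let i : Int := (s[idx].toNat : Int) - 97
    if PySem.List.pyGetD checked i false then false
    else agwLoop s (PySem.List.pySetD checked i true) (agwSkip s (idx + 1))
  else true
termination_by s.length - idx
decreasing_by have := agwSkip_ge s (idx + 1); omega

def is_group_word (string : String) : Bool :=
  agwLoop string.toList (List.replicate 26 false) 0

-- ===== PORT B =====
-- phase 1 step: 'if not blocks or blocks[-1] != c: blocks.append(c)'
def bCollapseStep (blocks : List Char) (c : Char) : List Char :=
  if blocks = [] ∨ ¬ (PySem.List.pyGet? blocks (-1) = some c) then blocks ++ [c] else blocks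

-- phase 2: marking pass over the block representatives
def bCheck (blocks : List Char) (checked : List Bool) : Bool :=
  match blocks with
  | [] => true
  | c :: rest =>
    let i : Int := (c.toNat : Int) - 97
    if PySem.List.pyGetD checked i false then false
    else bCheck rest (PySem.List.pySetD checked i true)

def is_group_word_alt (string : String) : Bool :=
  bCheck (string.toList.foldl bCollapseStep []) (List.replicate 26 false)

-- ===== PRECONDITION & SPEC =====
-- Pre_ excludes strings containing a character with code below 71 or above 122: when A reaches such a
-- character, checked[ord(c)-97] raises IndexError; on a few such strings an earlier repeated block
-- makes both A and B return False before reaching it (see the claim's cite), B behaves like A there too.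
def Pre_is_group_word (string : String) : Prop :=
  (string.toList.all fun c => 71 ≤ c.toNat && c.toNat ≤ 122) = true
instance (string : String) : Decidable (Pre_is_group_word string) := by
  unfold Pre_is_group_word; infer_instance
def pvWitness_is_group_word : String := "ab"

def Spec_is_group_word (string : String) (out : Bool) : Prop := out = is_group_word_alt string
instance (string : String) (out : Bool) : Decidable (Spec_is_group_word string out) := by unfold Spec_is_group_word; infer_instance

-- ===== CLAIM (what is proved, stated in full; the proofs are below) =====
def Claim_equal_is_group_word : Prop := ∀ (string : String), Dom_is_group_word string → Pre_is_group_word string → Spec_is_group_word string (is_group_word string)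

-- ===== LEMMAS AND PROOFS =====

-- head-recursive characterisation of phase 1 (prev = representative of the current run, if any)
def colFrom (prev : Option Char) : List Char → List Char
  | [] => []
  | c :: rest => if prev = some c then colFrom prev rest else c :: colFrom (some c) rest

theorem bCollapseStep_eq (acc : List Char) (c : Char) :
    bCollapseStep acc c = if acc.getLast? = some c then acc else acc ++ [c] := by
  unfold bCollapseStep
  cases acc with
  | nil => simp
  | cons x xs =>
    rw [PySem.List.pyGet?_neg_one]
    by_cases h : (x :: xs).getLast? = some c <;> simp [h]

theorem foldl_collapse (l : List Char) (acc : List Char) :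
    l.foldl bCollapseStep acc = acc ++ colFrom acc.getLast? l := by
  induction l generalizing acc with
  | nil => simp [colFrom]
  | cons c rest ih =>
    rw [List.foldl_cons, bCollapseStep_eq]
    by_cases h : acc.getLast? = some c
    · rw [if_pos h, ih, h]
      simp [colFrom]
    · rw [if_neg h, ih]
      have hl : (acc ++ [c]).getLast? = some c := by simp
      rw [hl]
      simp [colFrom, h]

theorem skip_colFrom (s : List Char) (j : Nat) (h1 : 0 < j) (h2 : j ≤ s.length) :
    colFrom s[j-1]? (s.drop j) = colFrom none (s.drop (agwSkip s j)) := by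
  unfold agwSkip
  by_cases hj : j < s.length
  · have hdrop : s.drop j = s[j] :: s.drop (j + 1) := (List.getElem_cons_drop hj).symm
    by_cases heq : s[j-1]? = s[j]?
    · rw [if_pos hj, if_pos heq]
      have hj1 : s[j]? = some s[j] := List.getElem?_eq_getElem hj
      rw [hdrop, heq, hj1, colFrom, if_pos rfl]
      have := skip_colFrom s (j + 1) (by omega) (by omega)
      simpa [hj1] using this
    · rw [if_pos hj, if_neg heq]
      have hj1 : s[j]? = some s[j] := List.getElem?_eq_getElem hj
      have hj0 : s[j-1]? = some s[j-1] := List.getElem?_eq_getElem (by omega)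
      have hne : (s[j-1]? : Option Char) ≠ some s[j] := by rw [← hj1]; exact heq
      rw [hdrop, colFrom, if_neg hne, colFrom, if_neg (by simp)]
  · have : j = s.length := by omega
    rw [if_neg hj]
    simp [this, colFrom]
termination_by s.length - j

theorem loop_eq_check (s : List Char) (checked : List Bool) (idx : Nat) :
    agwLoop s checked idx = bCheck (colFrom none (s.drop idx)) checked := by
  unfold agwLoop
  by_cases h : idx < s.length
  · have hdrop : s.drop idx = s[idx] :: s.drop (idx + 1) := (List.getElem_cons_drop h).symm
    have hcol : colFrom none (s[idx] :: s.drop (idx + 1))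
        = s[idx] :: colFrom (some s[idx]) (s.drop (idx + 1)) := by
      rw [colFrom, if_neg (by simp)]
    rw [dif_pos h, hdrop, hcol]
    simp only [bCheck]
    split_ifs with hc
    · rfl
    · have hrec := loop_eq_check s (PySem.List.pySetD checked ((s[idx].toNat : Int) - 97) true)
        (agwSkip s (idx + 1))
      have hskip := skip_colFrom s (idx + 1) (by omega) (by omega)
      have hj1 : s[(idx+1)-1]? = some s[idx] := by
        simp [List.getElem?_eq_getElem h]
      rw [hrec, ← hskip, hj1]
  · rw [dif_neg h]
    have : s.drop idx = [] := List.drop_eq_nil_of_le (by omega)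
    rw [this]; rfl
termination_by s.length - idx
decreasing_by have := agwSkip_ge s (idx + 1); omega

-- ===== VERDICT (by name: the statement is the Claim_ definition above) =====
theorem is_group_word_spec : Claim_equal_is_group_word := by
  intro string _ _
  unfold Spec_is_group_word is_group_word is_group_word_alt
  rw [loop_eq_check, foldl_collapse]
  simp
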